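-- pv_equiv track=rewrite | github.com/toki866/ApexTraderAI | tools/check_leak_alignment_v2.py | _detect_pos_col
-- ===== SOURCE A (Python) =====
-- from typing import List, Optional
--
-- def _detect_pos_col(cols: List[str]) -> Optional[str]:
--     for c in cols:
--         if c.lower() in ("pos", "position", "pos_ratio", "ratio", "weight", "w"):
--             return c
--     for c in cols:
--         if "pos" in c.lower():
--             return c
--     return None
-- ===== SOURCE B (Python) =====
-- from typing import List, Optional
--
-- _EXACT = {"pos", "position", "pos_ratio", "ratio", "weight", "w"}
--
-- def _detect_pos_col(cols: List[str]) -> Optional[str]: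
--     fallback = None
--     for c in cols:
--         lc = c.lower()
--         if lc in _EXACT:
--             return c
--         if fallback is None and "pos" in lc:
--             fallback = c
--     return fallback
-- ===== Notes on version B (the rewrite author's own statement) =====
-- stated objective: faster
-- what changed: Replaced A's two sequential scans (exact-name scan, then substring scan) with one pass that computes c.lower() once per element, returns immediately on an exact match, and records the first substring hit as a fallback returned after the loop.
import Mathlib
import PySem

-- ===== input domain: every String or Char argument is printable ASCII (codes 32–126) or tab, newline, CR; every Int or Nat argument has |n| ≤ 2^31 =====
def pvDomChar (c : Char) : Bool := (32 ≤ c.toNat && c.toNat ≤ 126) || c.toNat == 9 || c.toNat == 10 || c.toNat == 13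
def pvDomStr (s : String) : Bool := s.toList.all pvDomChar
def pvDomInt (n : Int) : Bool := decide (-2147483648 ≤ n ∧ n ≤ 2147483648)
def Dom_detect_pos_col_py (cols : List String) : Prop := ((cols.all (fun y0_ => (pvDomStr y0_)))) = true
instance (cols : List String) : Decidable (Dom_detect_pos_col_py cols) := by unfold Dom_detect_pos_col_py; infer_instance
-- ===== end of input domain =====

-- ===== PORT A =====
-- A: first loop over cols looking for an exact (lowercased) name; second loop looking for "pos" as substring.
def pvExactNames : List String := ["pos", "position", "pos_ratio", "ratio", "weight", "w"]

def pvALoop1 : List String → Option String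
  | [] => none
  | c :: rest => if PySem.Str.lower c ∈ pvExactNames then some c else pvALoop1 rest

def pvALoop2 : List String → Option String
  | [] => none
  | c :: rest => if PySem.Str.isIn "pos" (PySem.Str.lower c) then some c else pvALoop2 rest

def detect_pos_col_py (cols : List String) : Option String :=
  match pvALoop1 cols with
  | some c => some c
  | none => pvALoop2 cols

-- ===== PORT B =====
-- B: one pass; lower computed once; exact match returns; first substring hit kept as fallback.
def pvBGo : List String → Option String → Option String
  | [], fallback => fallback
  | c :: rest, fallback =>
    let lc := PySem.Str.lower c
    if lc ∈ pvExactNames then some c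
    else pvBGo rest (if fallback.isNone && PySem.Str.isIn "pos" lc then some c else fallback)

def detect_pos_col_py_alt (cols : List String) : Option String :=
  pvBGo cols none

-- ===== PRECONDITION & SPEC =====
def Spec_detect_pos_col_py (cols : List String) (out : Option String) : Prop := out = detect_pos_col_py_alt cols
instance (cols : List String) (out : Option String) : Decidable (Spec_detect_pos_col_py cols out) := by unfold Spec_detect_pos_col_py; infer_instance

-- ===== CLAIM (what is proved, stated in full; the proofs are below) =====
def Claim_equal_detect_pos_col_py : Prop := ∀ (cols : List String), Dom_detect_pos_col_py cols → Spec_detect_pos_col_py cols (detect_pos_col_py cols)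

-- ===== LEMMAS AND PROOFS =====

-- ===== VERDICT (by name: the statement is the Claim_ definition above) =====
lemma pvBGo_some (cols : List String) (f : String) :
    pvBGo cols (some f) = match pvALoop1 cols with | some c => some c | none => some f := by
  induction cols with
  | nil => rfl
  | cons c rest ih =>
    simp only [pvBGo, pvALoop1, Option.isNone_some, Bool.false_and, Bool.false_eq_true, if_false, ih]
    by_cases h : PySem.Str.lower c ∈ pvExactNames
    · rw [if_pos h, if_pos h]
    · rw [if_neg h, if_neg h]

lemma pvBGo_none (cols : List String) :
    pvBGo cols none = match pvALoop1 cols with | some c => some c | none => pvALoop2 cols := by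
  induction cols with
  | nil => rfl
  | cons c rest ih =>
    simp only [pvBGo, pvALoop1, pvALoop2, Option.isNone_none, Bool.true_and]
    by_cases h : PySem.Str.lower c ∈ pvExactNames
    · rw [if_pos h, if_pos h]
    · rw [if_neg h, if_neg h]
      by_cases h2 : PySem.Str.isIn "pos" (PySem.Str.lower c) = true
      · rw [if_pos h2, if_pos h2, pvBGo_some]
      · rw [if_neg h2, if_neg h2, ih]

theorem detect_pos_col_py_spec : Claim_equal_detect_pos_col_py := by
  intro cols _
  unfold Spec_detect_pos_col_py detect_pos_col_py detect_pos_col_py_alt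
  rw [pvBGo_none]
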